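-- pv_equiv track=rewrite | github.com/Grackoo/FA-ACADEMY | merge.py | filter_comps
-- ===== SOURCE A (Python) =====
-- def filter_comps(comps_str, names_to_remove):
--     lines = comps_str.split('\n')
--     out = []
--     skip = False
--     for line in lines:
--         if any(line.startswith(c) for c in names_to_remove):
--             skip = True
--
--         if skip and (line.strip() == '};' or line.strip() == ');'):
--             skip = False
--             continue
--
--         if not skip:
--             out.append(line)
--     return '\n'.join(out).strip()
-- ===== SOURCE B (Python) =====
-- def filter_comps(comps_str, names_to_remove):
--     lines = comps_str.split('\n')
--     out = []
--     i = 0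
--     n = len(lines)
--     while i < n:
--         line = lines[i]
--         if any(line.startswith(c) for c in names_to_remove):
--             while i < n and lines[i].strip() not in ('};', ');'):
--                 i += 1
--             i += 1  # drop the closing line as well
--         else:
--             out.append(line)
--             i += 1
--     return '\n'.join(out).strip()
-- ===== Notes on version B (the rewrite author's own statement) =====
-- stated objective: alternative
-- what changed: Replaces the carried boolean skip flag with an index-based scan: on a block-start line an inner while advances the index past the whole block up to and including its closing line, so lines inside a block are never re-examined by the outer loop's branch logic.
import Mathlib
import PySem

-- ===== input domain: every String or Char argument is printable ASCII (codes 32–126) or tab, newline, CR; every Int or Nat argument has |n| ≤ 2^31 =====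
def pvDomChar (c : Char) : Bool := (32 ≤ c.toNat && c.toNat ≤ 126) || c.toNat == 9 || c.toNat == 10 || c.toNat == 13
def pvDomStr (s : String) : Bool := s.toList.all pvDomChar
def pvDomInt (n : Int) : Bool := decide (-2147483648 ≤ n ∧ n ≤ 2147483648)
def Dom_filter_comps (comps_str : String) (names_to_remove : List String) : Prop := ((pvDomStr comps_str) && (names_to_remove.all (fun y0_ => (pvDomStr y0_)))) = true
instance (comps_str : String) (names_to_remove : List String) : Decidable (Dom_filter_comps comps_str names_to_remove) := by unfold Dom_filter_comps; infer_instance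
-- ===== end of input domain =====

-- B replaces A's carried boolean skip flag by an index-style scan that consumes a whole
-- block (up to and including its closing line) in one inner step; alternative decomposition.

-- ===== PORT A =====
def stepA (names_to_remove : List String) (st : List String × Bool) (line : String) : List String × Bool :=
  let skip := if names_to_remove.any (fun c => PySem.Str.startswith line c) then true else st.2
  if skip && (PySem.Str.strip line == "};" || PySem.Str.strip line == ");") then (st.1, false)
  else if !skip then (st.1 ++ [line], skip) else (st.1, skip)

def filter_comps (comps_str : String) (names_to_remove : List String) : String :=
  PySem.Str.strip (PySem.Str.join "\n"
    ((((PySem.Str.split? comps_str "\n").getD []).foldl (stepA names_to_remove) ([], false)).1))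

-- ===== PORT B =====
-- inner while: drop lines until one strips to '};' or ');', then drop that closing line too
def skipB : List String → List String
  | [] => []
  | l :: rest =>
    if PySem.Str.strip l == "};" || PySem.Str.strip l == ");" then rest else skipB rest

theorem skipB_length_le (xs : List String) : (skipB xs).length ≤ xs.length := by
  induction xs with
  | nil => simp [skipB]
  | cons l rest ih =>
    simp only [skipB]
    split
    · simp
    · exact Nat.le_succ_of_le ih

def goB (names_to_remove : List String) : List String → List String
  | [] => []
  | l :: rest =>
    if names_to_remove.any (fun c => PySem.Str.startswith l c) then
      goB names_to_remove (skipB (l :: rest))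
    else
      l :: goB names_to_remove rest
termination_by lines => lines.length
decreasing_by
  · simp only [skipB]
    split
    · simp
    · exact Nat.lt_succ_of_le (skipB_length_le rest)
  · simp

def filter_comps_alt (comps_str : String) (names_to_remove : List String) : String :=
  PySem.Str.strip (PySem.Str.join "\n" (goB names_to_remove ((PySem.Str.split? comps_str "\n").getD [])))

-- ===== PRECONDITION & SPEC =====
def Spec_filter_comps (comps_str : String) (names_to_remove : List String) (out : String) : Prop := out = filter_comps_alt comps_str names_to_remove
instance (comps_str : String) (names_to_remove : List String) (out : String) : Decidable (Spec_filter_comps comps_str names_to_remove out) := by unfold Spec_filter_comps; infer_instance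

-- ===== CLAIM (what is proved, stated in full; the proofs are below) =====
def Claim_equal_filter_comps : Prop := ∀ (comps_str : String) (names_to_remove : List String), Dom_filter_comps comps_str names_to_remove → Spec_filter_comps comps_str names_to_remove (filter_comps comps_str names_to_remove)

-- ===== LEMMAS AND PROOFS =====

-- in skip state, A's fold ignores lines until a closing line (skipB), keeping out unchanged
theorem foldA_true (names : List String) (lines : List String) (out : List String) :
    (lines.foldl (stepA names) (out, true)).1 = ((skipB lines).foldl (stepA names) (out, false)).1 := by
  induction lines generalizing out with
  | nil => simp [skipB]
  | cons l rest ih =>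
    by_cases hc : (PySem.Str.strip l == "};" || PySem.Str.strip l == ");") = true
    · have hstep : stepA names (out, true) l = (out, false) := by
        simp only [stepA, ite_self, hc, Bool.true_and, if_true]
      rw [List.foldl_cons, hstep, skipB, if_pos hc]
    · have hstep : stepA names (out, true) l = (out, true) := by
        simp only [stepA, ite_self, Bool.true_and]
        rw [if_neg hc]; simp
      rw [List.foldl_cons, hstep, ih, skipB, if_neg hc]

-- from the non-skip state, A's fold appends exactly goB of the remaining lines
theorem foldA_false (names : List String) : ∀ (n : Nat) (lines : List String), lines.length ≤ n →
    ∀ out, (lines.foldl (stepA names) (out, false)).1 = out ++ goB names lines := by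
  intro n
  induction n with
  | zero =>
    intro lines h out
    have : lines = [] := List.eq_nil_of_length_eq_zero (Nat.le_zero.mp h)
    subst this; simp [goB]
  | succ n ih =>
    intro lines h out
    match lines with
    | [] => simp [goB]
    | l :: rest =>
      have hlen : rest.length ≤ n := Nat.le_of_succ_le_succ h
      by_cases hs : (names.any fun c => PySem.Str.startswith l c) = true
      · by_cases hc : (PySem.Str.strip l == "};" || PySem.Str.strip l == ");") = true
        · have hstep : stepA names (out, false) l = (out, false) := by
            simp only [stepA, hs, hc, if_true, Bool.true_and]
          rw [List.foldl_cons, hstep, ih rest hlen out]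
          have hg : goB names (l :: rest) = goB names rest := by
            rw [goB, if_pos hs, skipB, if_pos hc]
          rw [hg]
        · have hstep : stepA names (out, false) l = (out, true) := by
            simp only [stepA, hs, if_true, Bool.true_and]
            rw [if_neg hc]; simp
          rw [List.foldl_cons, hstep, foldA_true,
              ih (skipB rest) (le_trans (skipB_length_le rest) hlen) out]
          have hg : goB names (l :: rest) = goB names (skipB rest) := by
            rw [goB, if_pos hs, skipB, if_neg hc]
          rw [hg]
      · have hstep : stepA names (out, false) l = (out ++ [l], false) := by
          simp only [stepA]
          rw [if_neg hs]; simp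
        rw [List.foldl_cons, hstep, ih rest hlen (out ++ [l])]
        have hg : goB names (l :: rest) = l :: goB names rest := by
          rw [goB, if_neg hs]
        rw [hg, List.append_assoc, List.singleton_append]

-- ===== VERDICT (by name: the statement is the Claim_ definition above) =====
theorem filter_comps_spec : Claim_equal_filter_comps := by
  intro comps_str names _
  unfold Spec_filter_comps filter_comps filter_comps_alt
  rw [foldA_false names ((PySem.Str.split? comps_str "\n").getD []).length _ le_rfl []]
  rw [List.nil_append]
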